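-- pv_equiv track=rewrite | github.com/BenjaminRains/dbt_dental_clinic | mariadb_postgre_pipe.py | is_bool_column
-- ===== SOURCE A (Python) =====
-- def is_bool_column(column_name: str, column_type: str) -> bool:
--     """Determine if a column should be treated as boolean based on name and type."""
--     # Check for tinyint(1) which is typically boolean in MySQL/MariaDB
--     if str(column_type).lower() == 'tinyint(1)':
--         return True
--
--     # Check for column names that typically indicate boolean values
--     bool_patterns = [
--         'is_', 'has_', 'show', 'use', 'allow', 'enable', 'disable',
--         'visible', 'active', 'hidden', 'locked', 'no', 'can',
--         'is', 'has', 'flag', 'bool', 'boolean', 'timelocked'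
--     ]
--
--     column_lower = column_name.lower()
--
--     # Direct exact matches for known boolean column names
--     known_boolean_columns = [
--         'timelocked', 'isnewpatient', 'ishygiene', 'isdeleted', 'isreverse',
--         'isestimate', 'isinsurance', 'isactive', 'iscomplete'
--     ]
--
--     if column_lower in known_boolean_columns:
--         return True
--
--     for pattern in bool_patterns:
--         if (column_lower.startswith(pattern) or
--             f"_{pattern}" in column_lower or
--             column_lower.endswith(f"_{pattern}")):
--             return True
--
--     return False
-- ===== SOURCE B (Python) =====
-- # Anchored suffix-scan: check a reduced pattern set at position 0 and after each
-- # underscore, instead of A's per-pattern startswith/substring/endswith tests.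
-- _PATTERNS = ('is', 'has', 'show', 'use', 'allow', 'enable', 'disable',
--              'visible', 'active', 'hidden', 'locked', 'no', 'can',
--              'flag', 'bool', 'timelocked')
--
--
-- def _match_here(s):
--     """Does some pattern occur right at the start of s?"""
--     return any(s.startswith(p) for p in _PATTERNS)
--
--
-- def _scan(s):
--     """Does some pattern occur immediately after an underscore in s?"""
--     for i in range(1, len(s)):
--         if s[i - 1] == '_' and _match_here(s[i:]):
--             return True
--     return False
--
--
-- def is_bool_column(column_name: str, column_type: str) -> bool:
--     if column_type.lower() == 'tinyint(1)':
--         return True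
--     s = column_name.lower()
--     return _match_here(s) or _scan(s)
-- ===== Notes on version B (the rewrite author's own statement) =====
-- stated objective: simpler
-- what changed: B replaces A's per-pattern startswith / '_'+pattern-substring / endswith tests over 18 patterns plus a 9-entry known-names list by a single anchored scan: one pass over the lowered name testing a reduced 16-pattern set at position 0 and right after each underscore (the endswith test, the 'is_'/'has_'/'boolean' patterns and the whole known-names list are provably redundant).
import Mathlib
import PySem

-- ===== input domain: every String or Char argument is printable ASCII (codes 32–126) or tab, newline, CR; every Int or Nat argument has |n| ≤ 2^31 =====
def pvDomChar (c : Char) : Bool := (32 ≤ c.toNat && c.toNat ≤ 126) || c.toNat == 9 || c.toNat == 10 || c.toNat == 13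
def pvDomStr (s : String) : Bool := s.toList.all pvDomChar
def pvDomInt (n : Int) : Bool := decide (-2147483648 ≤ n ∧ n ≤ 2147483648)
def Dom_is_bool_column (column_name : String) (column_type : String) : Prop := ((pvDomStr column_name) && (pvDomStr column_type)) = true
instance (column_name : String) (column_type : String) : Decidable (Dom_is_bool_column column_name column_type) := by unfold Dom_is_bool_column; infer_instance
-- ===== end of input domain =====

-- B replaces A's per-pattern startswith/substring/endswith tests (over a redundant
-- 18-pattern list plus a known-names list) by a single anchored scan of the name with a
-- reduced 16-pattern set; objective: simpler.

-- ===== PORT A =====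
-- f"_{pattern}" is ported exactly as '_' :: pattern on the List Char side.
def pvBoolPatternsA : List (List Char) :=
  ["is_".toList, "has_".toList, "show".toList, "use".toList, "allow".toList,
   "enable".toList, "disable".toList, "visible".toList, "active".toList,
   "hidden".toList, "locked".toList, "no".toList, "can".toList,
   "is".toList, "has".toList, "flag".toList, "bool".toList, "boolean".toList,
   "timelocked".toList]

def pvKnownBooleanColumns : List (List Char) :=
  ["timelocked".toList, "isnewpatient".toList, "ishygiene".toList, "isdeleted".toList,
   "isreverse".toList, "isestimate".toList, "isinsurance".toList, "isactive".toList,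
   "iscomplete".toList]

def is_bool_column (column_name : String) (column_type : String) : Bool :=
  if PySem.Chars.lower column_type.toList == "tinyint(1)".toList then true
  else
    let column_lower := PySem.Chars.lower column_name.toList
    if pvKnownBooleanColumns.contains column_lower then true
    else
      pvBoolPatternsA.any (fun p =>
        PySem.Chars.startswith column_lower p ||
        PySem.Chars.isIn ('_' :: p) column_lower ||
        PySem.Chars.endswith column_lower ('_' :: p))

-- ===== PORT B =====
def pvPatternsB : List (List Char) :=
  ["is".toList, "has".toList, "show".toList, "use".toList, "allow".toList,
   "enable".toList, "disable".toList, "visible".toList, "active".toList,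
   "hidden".toList, "locked".toList, "no".toList, "can".toList,
   "flag".toList, "bool".toList, "timelocked".toList]

-- Source B's _match_here: some pattern occurs right at the start of s
def pvMatchHere (s : List Char) : Bool :=
  pvPatternsB.any (fun p => PySem.Chars.startswith s p)

-- Source B's _scan loop: walk the string, testing _match_here right after each underscore
def pvScan : List Char → Bool
  | [] => false
  | c :: rest => (c == '_' && pvMatchHere rest) || pvScan rest

def is_bool_column_alt (column_name : String) (column_type : String) : Bool :=
  if PySem.Chars.lower column_type.toList == "tinyint(1)".toList then true
  else
    let s := PySem.Chars.lower column_name.toList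
    pvMatchHere s || pvScan s

-- ===== PRECONDITION & SPEC =====
def Spec_is_bool_column (column_name : String) (column_type : String) (out : Bool) : Prop := out = is_bool_column_alt column_name column_type
instance (column_name : String) (column_type : String) (out : Bool) : Decidable (Spec_is_bool_column column_name column_type out) := by unfold Spec_is_bool_column; infer_instance

-- ===== CLAIM (what is proved, stated in full; the proofs are below) =====
def Claim_equal_is_bool_column : Prop := ∀ (column_name : String) (column_type : String), Dom_is_bool_column column_name column_type → Spec_is_bool_column column_name column_type (is_bool_column column_name column_type)

-- ===== LEMMAS AND PROOFS =====

-- B's body (after the tinyint branch) on an arbitrary character list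
def pvBMatch (s : List Char) : Bool := pvMatchHere s || pvScan s

-- pvScan finds exactly the underscore-anchored occurrences
lemma pvScan_iff (s : List Char) :
    pvScan s = true ↔ ∃ l m, s = l ++ '_' :: m ∧ pvMatchHere m = true := by
  induction s with
  | nil => simp [pvScan]
  | cons c rest ih =>
    simp only [pvScan, Bool.or_eq_true, Bool.and_eq_true, beq_iff_eq, ih]
    constructor
    · rintro (⟨hc, hm⟩ | ⟨l, m, rfl, hm⟩)
      · exact ⟨[], rest, by simp [hc], hm⟩
      · exact ⟨c :: l, m, rfl, hm⟩
    · rintro ⟨l, m, hs, hm⟩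
      cases l with
      | nil => simp at hs; exact Or.inl ⟨hs.1, hs.2 ▸ hm⟩
      | cons a l' =>
        simp only [List.cons_append, List.cons.injEq] at hs
        exact Or.inr ⟨l', m, hs.2, hm⟩

-- underscore-prefixed infix occurrence = split at an underscore with a prefix match
lemma pvInfix_underscore (p s : List Char) :
    ('_' :: p) <:+: s ↔ ∃ l m, s = l ++ '_' :: m ∧ p <+: m := by
  constructor
  · rintro ⟨t, u, rfl⟩
    exact ⟨t, p ++ u, by simp, ⟨u, rfl⟩⟩
  · rintro ⟨l, m, rfl, u, rfl⟩
    exact ⟨l, u, by simp⟩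

lemma pvMatchHere_iff (s : List Char) :
    pvMatchHere s = true ↔ ∃ p ∈ pvPatternsB, p <+: s := by
  simp [pvMatchHere, List.any_eq_true, PySem.Chars.startswith_iff]

lemma pvBMatch_iff (s : List Char) :
    pvBMatch s = true ↔ ∃ p ∈ pvPatternsB, p <+: s ∨ ('_' :: p) <:+: s := by
  simp only [pvBMatch, Bool.or_eq_true, pvScan_iff]
  constructor
  · rintro (h | ⟨l, m, rfl, hm⟩)
    · obtain ⟨p, hp, hpre⟩ := (pvMatchHere_iff _).mp h
      exact ⟨p, hp, Or.inl hpre⟩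
    · obtain ⟨p, hp, hpre⟩ := (pvMatchHere_iff m).mp hm
      exact ⟨p, hp, Or.inr ((pvInfix_underscore p _).mpr ⟨l, m, rfl, hpre⟩)⟩
  · rintro ⟨p, hp, hpre | hinf⟩
    · exact Or.inl ((pvMatchHere_iff _).mpr ⟨p, hp, hpre⟩)
    · obtain ⟨l, m, rfl, hm⟩ := (pvInfix_underscore p _).mp hinf
      exact Or.inr ⟨l, m, rfl, (pvMatchHere_iff m).mpr ⟨p, hp, hm⟩⟩

-- every A-pattern has a B-pattern as a prefix (checked by computation)
lemma pvSubsume : ∀ p ∈ pvBoolPatternsA, ∃ q ∈ pvPatternsB, q <+: p := by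
  have h : pvBoolPatternsA.all (fun p => pvPatternsB.any (fun q => q.isPrefixOf p)) = true := by decide
  intro p hp
  rw [List.all_eq_true] at h
  obtain ⟨q, hq, hqp⟩ := List.any_eq_true.mp (h p hp)
  exact ⟨q, hq, List.isPrefixOf_iff_prefix.mp hqp⟩

-- every B-pattern is an A-pattern (checked by computation)
lemma pvSubset : ∀ q ∈ pvPatternsB, q ∈ pvBoolPatternsA := by
  have h : pvPatternsB.all (fun q => pvBoolPatternsA.contains q) = true := by decide
  intro q hq
  rw [List.all_eq_true] at h
  exact List.contains_iff_mem.mp (h q hq)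

-- every known boolean column name is matched by B (checked by computation)
lemma pvKnownMatched : ∀ k ∈ pvKnownBooleanColumns, pvBMatch k = true := by
  have h : pvKnownBooleanColumns.all pvBMatch = true := by decide
  exact List.all_eq_true.mp h

-- A's pattern test equals B's anchored match, on any character list
lemma pvMain (s : List Char) :
    (if pvKnownBooleanColumns.contains s then true
     else pvBoolPatternsA.any (fun p =>
        PySem.Chars.startswith s p ||
        PySem.Chars.isIn ('_' :: p) s ||
        PySem.Chars.endswith s ('_' :: p))) = pvBMatch s := by
  split_ifs with hk
  · exact (pvKnownMatched s (List.contains_iff_mem.mp hk)).symm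
  · rw [Bool.eq_iff_iff]
    simp only [List.any_eq_true, Bool.or_eq_true, PySem.Chars.startswith_iff,
      PySem.Chars.isIn_iff_infix, PySem.Chars.endswith_iff, pvBMatch_iff]
    constructor
    · rintro ⟨p, hp, (hpre | hinf) | hsuf⟩
      · obtain ⟨q, hq, hqp⟩ := pvSubsume p hp
        exact ⟨q, hq, Or.inl (hqp.trans hpre)⟩
      · obtain ⟨q, hq, hqp⟩ := pvSubsume p hp
        exact ⟨q, hq, Or.inr (((List.cons_prefix_cons.mpr ⟨rfl, hqp⟩).isInfix).trans hinf)⟩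
      · obtain ⟨q, hq, hqp⟩ := pvSubsume p hp
        exact ⟨q, hq, Or.inr (((List.cons_prefix_cons.mpr ⟨rfl, hqp⟩).isInfix).trans hsuf.isInfix)⟩
    · rintro ⟨q, hq, hpre | hinf⟩
      · exact ⟨q, pvSubset q hq, Or.inl (Or.inl hpre)⟩
      · exact ⟨q, pvSubset q hq, Or.inl (Or.inr hinf)⟩

-- ===== VERDICT (by name: the statement is the Claim_ definition above) =====
theorem is_bool_column_spec : Claim_equal_is_bool_column := by
  intro column_name column_type _
  unfold Spec_is_bool_column is_bool_column is_bool_column_alt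
  split_ifs with ht
  · rfl
  · exact pvMain (PySem.Chars.lower column_name.toList)
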